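-- pv_equiv track=rewrite | github.com/ericmerle3789/Collatz-Junction-Theorem | research_log/R158_trois_formalisations.py | k_energy_mixed_k3
-- ===== SOURCE A (Python) =====
-- from collections import defaultdict
--
-- def k_energy_mixed_k3(p, r):
--     """
--     E_mixed^{(3)} = #{(a₁,...,a₆) ∈ {1,...,r-1}^6 :
--         a₁+a₂+a₃ ≡ a₄+a₅+a₆ mod r           [ADD]
--         AND (1-2^a₁)(1-2^a₂)(1-2^a₃) = (1-2^a₄)(1-2^a₅)(1-2^a₆) [MULT]}
--
--     Key insight: For k=3, the Vieta argument requires 3 elementary symmetric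
--     functions to determine a triple. We only have 2 constraints (e₁ via ADD,
--     and e₂-e₃ via MULT combined with ADD). So N_cross MIGHT be > 0!
--
--     Method: group triples by (sum mod r, product mod p), count collisions.
--     """
--     pow2 = [1] * r
--     for a in range(1, r):
--         pow2[a] = (pow2[a-1] * 2) % p
--
--     h = {a: (1 - pow2[a]) % p for a in range(1, r)}
--
--     # Group triples by (sum mod r, product mod p)
--     triple_groups = defaultdict(list)
--     indices = list(range(1, r))
--
--     for a1 in indices:
--         for a2 in indices:
--             for a3 in indices:
--                 s = (a1 + a2 + a3) % r
--                 prod = (h[a1] * h[a2] % p * h[a3]) % p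
--                 triple_groups[(s, prod)].append((a1, a2, a3))
--
--     E_mixed = 0
--     E_trivial = 0
--     N_cross = 0
--
--     for key, triples in triple_groups.items():
--         n = len(triples)
--         E_mixed += n * n
--
--         # Count trivial: (a4,a5,a6) is a permutation of (a1,a2,a3)
--         for t1 in triples:
--             s1 = sorted(t1)
--             for t2 in triples:
--                 s2 = sorted(t2)
--                 if s1 == s2:
--                     E_trivial += 1
--
--     N_cross = E_mixed - E_trivial
--
--     return E_mixed, E_trivial, N_cross
-- ===== SOURCE B (Python) =====
-- def k_energy_mixed_k3(p, r):
--     # One pass over triples with two counters: no stored triple lists, no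
--     # quadratic per-group pair scan.  E_mixed / E_trivial are sums of squared
--     # group sizes, grouping by (sum mod r, product mod p) and additionally by
--     # the sorted triple for the trivial count.
--     h = {}
--     t = 1
--     for a in range(1, r):
--         t = t * 2 % p
--         h[a] = (1 - t) % p
--
--     key_counts = {}
--     class_counts = {}
--     for a1 in range(1, r):
--         for a2 in range(1, r):
--             for a3 in range(1, r):
--                 s = (a1 + a2 + a3) % r
--                 prod = h[a1] * h[a2] % p * h[a3] % p
--                 k = (s, prod)
--                 key_counts[k] = key_counts.get(k, 0) + 1
--                 c = (k, tuple(sorted((a1, a2, a3))))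
--                 class_counts[c] = class_counts.get(c, 0) + 1
--
--     E_mixed = sum(n * n for n in key_counts.values())
--     E_trivial = sum(n * n for n in class_counts.values())
--     return E_mixed, E_trivial, E_mixed - E_trivial
-- ===== Notes on version B (the rewrite author's own statement) =====
-- stated objective: alternative
-- what changed: Instead of storing every triple in per-key lists and then comparing all pairs inside each group (quadratic in group size), B makes one pass over the triples maintaining two counters - one keyed by (sum mod r, product mod p) and one additionally by the sorted triple - and returns the sums of squared counts; it avoids A's per-group pair scan but still enumerates all (r-1)^3 triples.
import Mathlib
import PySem

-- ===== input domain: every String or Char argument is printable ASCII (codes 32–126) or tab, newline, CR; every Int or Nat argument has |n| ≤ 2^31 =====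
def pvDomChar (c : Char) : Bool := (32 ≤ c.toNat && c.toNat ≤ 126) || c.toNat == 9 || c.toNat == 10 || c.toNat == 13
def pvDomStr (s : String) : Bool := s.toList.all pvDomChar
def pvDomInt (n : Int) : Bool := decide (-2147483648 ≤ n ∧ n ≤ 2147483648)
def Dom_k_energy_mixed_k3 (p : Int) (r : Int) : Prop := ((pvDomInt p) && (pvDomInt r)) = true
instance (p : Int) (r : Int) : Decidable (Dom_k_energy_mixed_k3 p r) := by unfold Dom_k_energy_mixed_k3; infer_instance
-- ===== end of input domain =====

-- B replaces A's per-key triple lists and the quadratic-in-group-size pair scans by one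
-- pass over the triples maintaining two counters (per key, and per key × sorted triple),
-- returning the sums of squared counts.

-- ===== PORT A =====
def k_energy_mixed_k3 (p : Int) (r : Int) : List Int :=
  let pow2 : List Int := (PySem.List.pyRange 1 r).foldl
    (fun l a => l.set a.toNat (PySem.Int.mod (l.getD (a.toNat - 1) 0 * 2) p))
    (List.replicate r.toNat 1)
  let h : PySem.Dict Int Int := (PySem.List.pyRange 1 r).foldl
    (fun d a => d.insert a (PySem.Int.mod (1 - pow2.getD a.toNat 0) p)) PySem.Dict.empty
  let indices := PySem.List.pyRange 1 r
  let tg : PySem.Dict (Int × Int) (List (Int × Int × Int)) :=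
    indices.foldl (fun d a1 =>
      indices.foldl (fun d a2 =>
        indices.foldl (fun d a3 =>
          let s := PySem.Int.mod (a1 + a2 + a3) r
          let pr := PySem.Int.mod (PySem.Int.mod (h.getD a1 0 * h.getD a2 0) p * h.getD a3 0) p
          d.modify (s, pr) [] (fun l => l ++ [(a1, a2, a3)])) d) d)
      PySem.Dict.empty
  let res : Int × Int := tg.items.foldl (fun em_et kv =>
      let n : Int := kv.2.length
      let em := em_et.1 + n * n
      let et := kv.2.foldl (fun et t1 =>
          let s1 := PySem.List.sorted [t1.1, t1.2.1, t1.2.2] (fun x => x) false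
          kv.2.foldl (fun et t2 =>
            let s2 := PySem.List.sorted [t2.1, t2.2.1, t2.2.2] (fun x => x) false
            if s1 = s2 then et + 1 else et) et) em_et.2
      (em, et)) (0, 0)
  [res.1, res.2, res.1 - res.2]


-- ===== PORT B =====
def k_energy_mixed_k3_alt (p : Int) (r : Int) : List Int :=
  let h : PySem.Dict Int Int :=
    ((PySem.List.pyRange 1 r).foldl
      (fun (st : Int × PySem.Dict Int Int) a =>
        let t := PySem.Int.mod (st.1 * 2) p
        (t, st.2.insert a (PySem.Int.mod (1 - t) p)))
      (1, PySem.Dict.empty)).2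
  let cnts :
      PySem.Dict (Int × Int) Int × PySem.Dict ((Int × Int) × List Int) Int :=
    (PySem.List.pyRange 1 r).foldl (fun cc a1 =>
      (PySem.List.pyRange 1 r).foldl (fun cc a2 =>
        (PySem.List.pyRange 1 r).foldl (fun cc a3 =>
          let s := PySem.Int.mod (a1 + a2 + a3) r
          let pr := PySem.Int.mod (PySem.Int.mod (h.getD a1 0 * h.getD a2 0) p * h.getD a3 0) p
          let k := (s, pr)
          let c := (k, PySem.List.sorted [a1, a2, a3] (fun x => x) false)
          (cc.1.insert k (cc.1.getD k 0 + 1), cc.2.insert c (cc.2.getD c 0 + 1))) cc) cc)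
      (PySem.Dict.empty, PySem.Dict.empty)
  let em := (cnts.1.values.map (fun n => n * n)).sum
  let et := (cnts.2.values.map (fun n => n * n)).sum
  [em, et, em - et]

-- B's counters are Counter(L.map key) and Counter(L.map key2)

-- ===== PRECONDITION & SPEC =====
-- Pre_ excludes exactly the inputs on which the Python A raises ZeroDivisionError
-- (p = 0 with r ≥ 2 reaches '% p'); B raises there too.
def Pre_k_energy_mixed_k3 (p : Int) (r : Int) : Prop := p ≠ 0 ∨ r ≤ 1
instance (p : Int) (r : Int) : Decidable (Pre_k_energy_mixed_k3 p r) := by unfold Pre_k_energy_mixed_k3; infer_instance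
def pvWitness_k_energy_mixed_k3 : Int × Int := (5, 4)

def Spec_k_energy_mixed_k3 (p : Int) (r : Int) (out : List Int) : Prop := out = k_energy_mixed_k3_alt p r
instance (p : Int) (r : Int) (out : List Int) : Decidable (Spec_k_energy_mixed_k3 p r out) := by unfold Spec_k_energy_mixed_k3; infer_instance

-- ===== CLAIM (what is proved, stated in full; the proofs are below) =====
def Claim_equal_k_energy_mixed_k3 : Prop := ∀ (p : Int) (r : Int), Dom_k_energy_mixed_k3 p r → Pre_k_energy_mixed_k3 p r → Spec_k_energy_mixed_k3 p r (k_energy_mixed_k3 p r)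

-- ===== LEMMAS AND PROOFS =====
def pvG2 (p : Int) : Nat → Int
  | 0 => 1
  | n + 1 => PySem.Int.mod (pvG2 p n * 2) p
def pvRL (n : Nat) : List Int := (List.range n).map (fun k : Nat => 1 + (k : Int))
lemma pvRL_succ (n : Nat) : pvRL (n + 1) = pvRL n ++ [1 + (n : Int)] := by
  simp [pvRL, List.range_succ]
lemma pvRange_eq (r : Int) : PySem.List.pyRange 1 r = pvRL (r - 1).toNat := by
  unfold pvRL
  by_cases h : (1:Int) < r
  · norm_num [PySem.List.pyRange, h]
  · norm_num [PySem.List.pyRange, h]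
    omega
lemma pvPow2_char (p : Int) (N n : Nat) (h : n < N) :
    ((pvRL n).foldl
      (fun l a => l.set a.toNat (PySem.Int.mod (l.getD (a.toNat - 1) 0 * 2) p))
      (List.replicate N 1)).length = N ∧
    ∀ i : Nat, i ≤ n →
    ((pvRL n).foldl
      (fun l a => l.set a.toNat (PySem.Int.mod (l.getD (a.toNat - 1) 0 * 2) p))
      (List.replicate N 1)).getD i 0 = pvG2 p i := by
  induction n with
  | zero =>
    refine ⟨by simp [pvRL], ?_⟩
    intro i hi
    have : i = 0 := by omega
    subst this
    simp [pvRL, List.getD, pvG2, h]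
  | succ n ih =>
    obtain ⟨hlen, hval⟩ := ih (by omega)
    rw [pvRL_succ, List.foldl_append]
    simp only [List.foldl_cons, List.foldl_nil]
    have ht : ((1 : Int) + (n : Int)).toNat = n + 1 := by omega
    rw [ht]
    refine ⟨by simp; exact hlen, ?_⟩
    intro i hi
    have hg := hval n (le_refl n)
    by_cases hc : i = n + 1
    · subst hc
      rw [show n + 1 - 1 = n from rfl, hg]
      rw [List.getD, List.getElem?_set_self]
      · rfl
      · omega
    · rw [List.getD, List.getElem?_set_ne (by omega)]
      exact hval i (by omega)
def pvH (p r : Int) : PySem.Dict Int Int :=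
  (PySem.List.pyRange 1 r).foldl
    (fun d a => d.insert a (PySem.Int.mod (1 - pvG2 p a.toNat) p)) PySem.Dict.empty
lemma pvHA_eq (p r : Int) :
    (PySem.List.pyRange 1 r).foldl
      (fun d a => d.insert a (PySem.Int.mod (1 -
        ((PySem.List.pyRange 1 r).foldl
          (fun l a => l.set a.toNat (PySem.Int.mod (l.getD (a.toNat - 1) 0 * 2) p))
          (List.replicate r.toNat 1)).getD a.toNat 0) p)) PySem.Dict.empty = pvH p r := by
  unfold pvH
  rw [pvRange_eq]
  apply PySem.List.foldl_congr_mem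
  intro acc a ha
  have h1 : 1 ≤ a ∧ a < r := by
    unfold pvRL at ha
    simp at ha
    obtain ⟨k, hk, rfl⟩ := ha
    omega
  have hlt : (r - 1).toNat < r.toNat := by omega
  have := (pvPow2_char p r.toNat (r-1).toNat hlt).2 a.toNat (by omega)
  rw [this]
lemma pvHB_gen (p : Int) (n : Nat) :
    (pvRL n).foldl
      (fun (st : Int × PySem.Dict Int Int) a =>
        let t := PySem.Int.mod (st.1 * 2) p
        (t, st.2.insert a (PySem.Int.mod (1 - t) p)))
      (1, PySem.Dict.empty)
    = (pvG2 p n,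
       (pvRL n).foldl (fun d a => d.insert a (PySem.Int.mod (1 - pvG2 p a.toNat) p)) PySem.Dict.empty) := by
  induction n with
  | zero => simp [pvRL, pvG2]
  | succ n ih =>
    rw [pvRL_succ, List.foldl_append, List.foldl_append, ih]
    simp only [List.foldl_cons, List.foldl_nil]
    have ht : ((1 : Int) + (n : Int)).toNat = n + 1 := by omega
    rw [ht]
    rfl
lemma pvHB_eq (p r : Int) :
    (PySem.List.pyRange 1 r).foldl
      (fun (st : Int × PySem.Dict Int Int) a =>
        let t := PySem.Int.mod (st.1 * 2) p
        (t, st.2.insert a (PySem.Int.mod (1 - t) p)))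
      (1, PySem.Dict.empty) = (pvG2 p (r - 1).toNat, pvH p r) := by
  unfold pvH
  rw [pvRange_eq, pvHB_gen]
def pvTriples (r : Int) : List (Int × Int × Int) :=
  (PySem.List.pyRange 1 r).flatMap (fun a1 =>
    (PySem.List.pyRange 1 r).flatMap (fun a2 =>
      (PySem.List.pyRange 1 r).map (fun a3 => (a1, a2, a3))))
lemma pvFoldl_flatMap {α β δ : Type} (l : List α) (g : α → List β) (f : δ → β → δ) (init : δ) :
    (l.flatMap g).foldl f init = l.foldl (fun acc x => (g x).foldl f acc) init := by
  induction l generalizing init with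
  | nil => rfl
  | cons x xs ih => simp [List.flatMap_cons, List.foldl_append, ih]
lemma pvNest {δ : Type} (r : Int) (f : δ → (Int × Int × Int) → δ) (init : δ) :
    (PySem.List.pyRange 1 r).foldl (fun d a1 =>
      (PySem.List.pyRange 1 r).foldl (fun d a2 =>
        (PySem.List.pyRange 1 r).foldl (fun d a3 => f d (a1, a2, a3)) d) d) init
    = (pvTriples r).foldl f init := by
  unfold pvTriples
  rw [pvFoldl_flatMap]
  apply PySem.List.foldl_congr_mem
  intro acc a1 _
  rw [pvFoldl_flatMap]
  apply PySem.List.foldl_congr_mem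
  intro acc a2 _
  rw [List.foldl_map]
lemma pvSum_ite_zero {κ : Type} [DecidableEq κ] (K : List κ) (k : κ) (v : Int) (h : k ∉ K) :
    (K.map (fun c => if k = c then v else 0)).sum = 0 := by
  induction K with
  | nil => rfl
  | cons c K ih =>
    simp only [List.map_cons, List.sum_cons]
    rw [if_neg (by intro hh; exact h (hh ▸ List.mem_cons_self)), ih (fun hm => h (List.mem_cons_of_mem _ hm))]
    ring
lemma pvSum_ite_single {κ : Type} [DecidableEq κ] (K : List κ) (hK : K.Nodup) (k : κ) (v : Int)
    (hk : k ∈ K) : (K.map (fun c => if k = c then v else 0)).sum = v := by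
  induction K with
  | nil => cases hk
  | cons c K ih =>
    simp only [List.map_cons, List.sum_cons]
    rcases List.mem_cons.mp hk with rfl | hm
    · rw [if_pos rfl, pvSum_ite_zero K k v (List.nodup_cons.mp hK).1]
      ring
    · rw [if_neg (by rintro rfl; exact (List.nodup_cons.mp hK).1 hm), ih (List.nodup_cons.mp hK).2 hm]
      ring
lemma pvSum_partition {α κ : Type} [BEq κ] [LawfulBEq κ] [DecidableEq κ]
    (K : List κ) (hK : K.Nodup) (L : List α) (f : α → κ)
    (hcov : ∀ t ∈ L, f t ∈ K) (g : α → Int) :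
    (K.map (fun c => ((L.filter (fun t => f t == c)).map g).sum)).sum = (L.map g).sum := by
  induction L with
  | nil => simp
  | cons x L ih =>
    have hstep : ∀ c ∈ K,
        (((x :: L).filter (fun t => f t == c)).map g).sum
        = (if f x = c then g x else 0) + ((L.filter (fun t => f t == c)).map g).sum := by
      intro c _
      by_cases hc : f x = c
      · rw [List.filter_cons_of_pos (by simp [hc])]
        simp [hc]
      · rw [List.filter_cons_of_neg (by simp [hc])]
        simp [hc]
    rw [List.map_congr_left hstep, PySem.List.sum_map_add_int,
        pvSum_ite_single K hK (f x) (g x) (hcov x List.mem_cons_self),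
        ih (fun t ht => hcov t (List.mem_cons_of_mem _ ht))]
    simp
def pvKey (p r : Int) (t : Int × Int × Int) : Int × Int :=
  (PySem.Int.mod (t.1 + t.2.1 + t.2.2) r,
   PySem.Int.mod (PySem.Int.mod ((pvH p r).getD t.1 0 * (pvH p r).getD t.2.1 0) p * (pvH p r).getD t.2.2 0) p)
def pvSort3 (t : Int × Int × Int) : List Int :=
  PySem.List.sorted [t.1, t.2.1, t.2.2] (fun x => x) false
def pvKey2 (p r : Int) (t : Int × Int × Int) : (Int × Int) × List Int :=
  (pvKey p r t, pvSort3 t)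
def pvPsi (p r : Int) (t1 : Int × Int × Int) : Int :=
  ((pvTriples r).countP (fun t2 => pvKey2 p r t2 == pvKey2 p r t1) : Int)
def pvPC (p r : Int) : Int := ((pvTriples r).map (pvPsi p r)).sum
def pvCnt (p r : Int) (c : Int × Int) : Int :=
  ((pvTriples r).countP (fun t => pvKey p r t == c) : Int)
def pvK (p r : Int) : List (Int × Int) := PySem.Set.ofList ((pvTriples r).map (pvKey p r))
def pvEM (p r : Int) : Int := ((pvK p r).map (fun c => pvCnt p r c * pvCnt p r c)).sum

lemma pvB_counters (p r : Int) :
    (PySem.List.pyRange 1 r).foldl (fun cc a1 =>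
      (PySem.List.pyRange 1 r).foldl (fun cc a2 =>
        (PySem.List.pyRange 1 r).foldl (fun cc a3 =>
          let s := PySem.Int.mod (a1 + a2 + a3) r
          let pr := PySem.Int.mod (PySem.Int.mod ((pvH p r).getD a1 0 * (pvH p r).getD a2 0) p * (pvH p r).getD a3 0) p
          let k := (s, pr)
          let c := (k, PySem.List.sorted [a1, a2, a3] (fun x => x) false)
          (cc.1.insert k (cc.1.getD k 0 + 1), cc.2.insert c (cc.2.getD c 0 + 1))) cc) cc)
      ((PySem.Dict.empty : PySem.Dict (Int × Int) Int),
       (PySem.Dict.empty : PySem.Dict ((Int × Int) × List Int) Int))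
    = (PySem.Dict.counter ((pvTriples r).map (pvKey p r)),
       PySem.Dict.counter ((pvTriples r).map (pvKey2 p r))) := by
  simp only []
  rw [pvNest r (fun (cc : PySem.Dict (Int × Int) Int × PySem.Dict ((Int × Int) × List Int) Int)
      (t : Int × Int × Int) =>
      (cc.1.insert
        (PySem.Int.mod (t.1 + t.2.1 + t.2.2) r,
         PySem.Int.mod (PySem.Int.mod ((pvH p r).getD t.1 0 * (pvH p r).getD t.2.1 0) p * (pvH p r).getD t.2.2 0) p)
        (cc.1.getD
          (PySem.Int.mod (t.1 + t.2.1 + t.2.2) r,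
           PySem.Int.mod (PySem.Int.mod ((pvH p r).getD t.1 0 * (pvH p r).getD t.2.1 0) p * (pvH p r).getD t.2.2 0) p) 0 + 1),
       cc.2.insert
        ((PySem.Int.mod (t.1 + t.2.1 + t.2.2) r,
          PySem.Int.mod (PySem.Int.mod ((pvH p r).getD t.1 0 * (pvH p r).getD t.2.1 0) p * (pvH p r).getD t.2.2 0) p),
         PySem.List.sorted [t.1, t.2.1, t.2.2] (fun x => x) false)
        (cc.2.getD
          ((PySem.Int.mod (t.1 + t.2.1 + t.2.2) r,
            PySem.Int.mod (PySem.Int.mod ((pvH p r).getD t.1 0 * (pvH p r).getD t.2.1 0) p * (pvH p r).getD t.2.2 0) p),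
           PySem.List.sorted [t.1, t.2.1, t.2.2] (fun x => x) false) 0 + 1)))]
  show (pvTriples r).foldl (fun (cc : PySem.Dict (Int × Int) Int × PySem.Dict ((Int × Int) × List Int) Int) t =>
      (cc.1.insert (pvKey p r t) (cc.1.getD (pvKey p r t) 0 + 1),
       cc.2.insert (pvKey2 p r t) (cc.2.getD (pvKey2 p r t) 0 + 1)))
      (PySem.Dict.empty, PySem.Dict.empty) = _
  rw [PySem.List.foldl_prod_mk
      (f := fun (d : PySem.Dict (Int × Int) Int) t => d.insert (pvKey p r t) (d.getD (pvKey p r t) 0 + 1))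
      (g := fun (d : PySem.Dict ((Int × Int) × List Int) Int) t => d.insert (pvKey2 p r t) (d.getD (pvKey2 p r t) 0 + 1))]
  rw [← List.foldl_map (f := pvKey p r)
        (g := fun (d : PySem.Dict (Int × Int) Int) x => d.insert x (d.getD x 0 + 1)),
      ← List.foldl_map (f := pvKey2 p r)
        (g := fun (d : PySem.Dict ((Int × Int) × List Int) Int) x => d.insert x (d.getD x 0 + 1)),
      PySem.Dict.foldl_insert_getD_add_one_eq_counter,
      PySem.Dict.foldl_insert_getD_add_one_eq_counter]lemma pvCount_map {α κ : Type} [BEq κ] [LawfulBEq κ] (L : List α) (f : α → κ) (c : κ) :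
    (L.map f).count c = L.countP (fun t => f t == c) := by
  rw [List.count_eq_countP, List.countP_map]
  rfl
lemma pvY (p r : Int) :
    ((PySem.Set.ofList ((pvTriples r).map (pvKey2 p r))).map
      (fun c2 => ((pvTriples r).countP (fun t => pvKey2 p r t == c2) : Int) *
                 ((pvTriples r).countP (fun t => pvKey2 p r t == c2) : Int))).sum = pvPC p r := by
  have hstep : ∀ c2 ∈ PySem.Set.ofList ((pvTriples r).map (pvKey2 p r)),
      ((pvTriples r).countP (fun t => pvKey2 p r t == c2) : Int) *
      ((pvTriples r).countP (fun t => pvKey2 p r t == c2) : Int)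
      = (((pvTriples r).filter (fun t => pvKey2 p r t == c2)).map (pvPsi p r)).sum := by
    intro c2 _
    have hpsi : ∀ t1 ∈ (pvTriples r).filter (fun t => pvKey2 p r t == c2),
        pvPsi p r t1 = ((pvTriples r).countP (fun t => pvKey2 p r t == c2) : Int) := by
      intro t1 ht1
      have h2 : pvKey2 p r t1 = c2 := by
        have := (List.mem_filter.mp ht1).2
        exact eq_of_beq this
      unfold pvPsi
      rw [h2]
    rw [List.map_congr_left hpsi, PySem.List.sum_map_const_int, ← List.countP_eq_length_filter]
  rw [List.map_congr_left hstep,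
      pvSum_partition _ (PySem.Set.nodup_ofList _) _ _
        (fun t ht => (PySem.Set.mem_ofList _ _).mpr (List.mem_map_of_mem ht)) (pvPsi p r)]
  rfl
lemma pvB_eq (p r : Int) :
    k_energy_mixed_k3_alt p r = [pvEM p r, pvPC p r, pvEM p r - pvPC p r] := by
  unfold k_energy_mixed_k3_alt
  simp only []
  rw [pvHB_eq, pvB_counters]
  simp only [PySem.Dict.values, PySem.Dict.items_counter, List.map_map]
  have h1 : ((PySem.Set.ofList ((pvTriples r).map (pvKey p r))).map
      ((fun n => n * n) ∘ Prod.snd ∘ fun k => (k, (((pvTriples r).map (pvKey p r)).count k : Int)))).sum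
      = pvEM p r := by
    unfold pvEM pvCnt pvK
    apply congrArg
    apply List.map_congr_left
    intro c _
    simp [Function.comp, pvCount_map]
  have h2 : ((PySem.Set.ofList ((pvTriples r).map (pvKey2 p r))).map
      ((fun n => n * n) ∘ Prod.snd ∘ fun k => (k, (((pvTriples r).map (pvKey2 p r)).count k : Int)))).sum
      = pvPC p r := by
    rw [← pvY p r]
    apply congrArg
    apply List.map_congr_left
    intro c _
    simp [Function.comp, pvCount_map]
  rw [h1, h2]
def pvTG (p r : Int) : PySem.Dict (Int × Int) (List (Int × Int × Int)) :=
  (pvTriples r).foldl (fun d t => d.modify (pvKey p r t) [] (fun l => l ++ [t])) PySem.Dict.empty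
lemma pvTG_keys (p r : Int) : (pvTG p r).keys = pvK p r := by
  unfold pvTG pvK
  rw [PySem.Dict.keys_foldl_modify_key (pvTriples r) (pvKey p r) [] (fun _ x => fun l => l ++ [x])
      PySem.Dict.empty]
  simp [PySem.Set.update_nil_left]
lemma pvTG_nodup (p r : Int) : (pvTG p r).keys.Nodup := by
  unfold pvTG
  apply PySem.Dict.nodup_keys_foldl_modify_key (pvTriples r) (pvKey p r) [] (fun _ x => fun l => l ++ [x])
  simp
lemma pvTG_getD (p r : Int) (c : Int × Int) :
    (pvTG p r).getD c [] = (pvTriples r).filter (fun t => pvKey p r t == c) := by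
  unfold pvTG
  rw [show (pvTriples r).foldl (fun d t => d.modify (pvKey p r t) [] (fun l => l ++ [t])) PySem.Dict.empty
      = ((pvTriples r).map (fun t => (pvKey p r t, t))).foldl
          (fun d pr => d.modify pr.1 [] (fun l => l ++ [pr.2])) PySem.Dict.empty
      from (List.foldl_map (f := fun t => (pvKey p r t, t))
        (g := fun (d : PySem.Dict (Int × Int) (List (Int × Int × Int))) pr =>
          d.modify pr.1 [] (fun l => l ++ [pr.2]))).symm]
  rw [PySem.Dict.getD_foldl_modify_append]
  rw [List.filter_map, List.map_map]
  simp [Function.comp_def]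
lemma pvTG_items (p r : Int) :
    (pvTG p r).items = (pvK p r).map (fun c => (c, (pvTriples r).filter (fun t => pvKey p r t == c))) := by
  rw [PySem.Dict.items_eq_map_keys (pvTG p r) (pvTG_nodup p r) [], pvTG_keys]
  exact List.map_congr_left (fun c _ => by rw [pvTG_getD])
lemma pvInner (g : List (Int × Int × Int)) (e : Int) :
    g.foldl (fun et t1 => g.foldl (fun et t2 => if pvSort3 t1 = pvSort3 t2 then et + 1 else et) et) e
    = e + (g.map (fun t1 => (g.countP (fun t2 => decide (pvSort3 t1 = pvSort3 t2)) : Int))).sum := by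
  rw [PySem.List.foldl_congr_mem g _ (fun et t1 => et + (g.countP (fun t2 => decide (pvSort3 t1 = pvSort3 t2)) : Int)) e
      (fun acc t1 _ => PySem.List.foldl_ite_add_one (fun t2 => pvSort3 t1 = pvSort3 t2) g acc),
    PySem.List.foldl_add]
lemma pvX (p r : Int) :
    ((pvK p r).map (fun c =>
      (((pvTriples r).filter (fun t => pvKey p r t == c)).map
        (fun t1 => ((((pvTriples r).filter (fun t => pvKey p r t == c)).countP
            (fun t2 => decide (pvSort3 t1 = pvSort3 t2))) : Int))).sum)).sum = pvPC p r := by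
  have hstep : ∀ c ∈ pvK p r,
      (((pvTriples r).filter (fun t => pvKey p r t == c)).map
        (fun t1 => ((((pvTriples r).filter (fun t => pvKey p r t == c)).countP
            (fun t2 => decide (pvSort3 t1 = pvSort3 t2))) : Int))).sum
      = (((pvTriples r).filter (fun t => pvKey p r t == c)).map (pvPsi p r)).sum := by
    intro c _
    apply congrArg
    apply List.map_congr_left
    intro t1 ht1
    have hkey : pvKey p r t1 = c := eq_of_beq (List.mem_filter.mp ht1).2
    unfold pvPsi
    rw [List.countP_filter]
    congr 1
    apply List.countP_congr
    intro t2 _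
    subst hkey
    rw [Bool.eq_iff_iff]
    simp only [Bool.and_eq_true, decide_eq_true_eq, beq_iff_eq, pvKey2, Prod.mk.injEq]
    rw [iff_true]
    exact ⟨fun h => ⟨h.2, h.1.symm⟩, fun h => ⟨h.2.symm, h.1⟩⟩
  rw [List.map_congr_left hstep]
  unfold pvK
  rw [pvSum_partition _ (PySem.Set.nodup_ofList _) _ _
        (fun t ht => (PySem.Set.mem_ofList _ _).mpr (List.mem_map_of_mem ht)) (pvPsi p r)]
  rfl
def pvBigF : Int × Int → (Int × Int) × List (Int × Int × Int) → Int × Int :=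
  fun em_et kv =>
    (em_et.1 + (kv.2.length : Int) * (kv.2.length : Int),
     kv.2.foldl (fun et t1 =>
       kv.2.foldl (fun et t2 => if pvSort3 t1 = pvSort3 t2 then et + 1 else et) et) em_et.2)

lemma pvRes_eq (p r : Int) :
    (pvTG p r).items.foldl pvBigF (0, 0) = (pvEM p r, pvPC p r) := by
  rw [pvTG_items,
      List.foldl_map (f := fun c => (c, (pvTriples r).filter (fun t => pvKey p r t == c)))
        (g := pvBigF)]
  rw [PySem.List.foldl_congr_mem _ _
      (fun (st : Int × Int) c =>
        (st.1 + (((pvTriples r).filter (fun t => pvKey p r t == c)).length : Int) *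
                (((pvTriples r).filter (fun t => pvKey p r t == c)).length : Int),
         st.2 + (((pvTriples r).filter (fun t => pvKey p r t == c)).map
            (fun t1 => ((((pvTriples r).filter (fun t => pvKey p r t == c)).countP
              (fun t2 => decide (pvSort3 t1 = pvSort3 t2))) : Int))).sum)) (0, 0)
      (fun acc c _ => by unfold pvBigF; rw [pvInner])]
  rw [PySem.List.foldl_prod_mk
      (f := fun (em : Int) c => em + (((pvTriples r).filter (fun t => pvKey p r t == c)).length : Int) *
                (((pvTriples r).filter (fun t => pvKey p r t == c)).length : Int))
      (g := fun (et : Int) c => et + (((pvTriples r).filter (fun t => pvKey p r t == c)).map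
            (fun t1 => ((((pvTriples r).filter (fun t => pvKey p r t == c)).countP
              (fun t2 => decide (pvSort3 t1 = pvSort3 t2))) : Int))).sum)]
  rw [PySem.List.foldl_add, PySem.List.foldl_add, zero_add, zero_add, pvX]
  have hem : ((pvK p r).map (fun c =>
      (((pvTriples r).filter (fun t => pvKey p r t == c)).length : Int) *
      (((pvTriples r).filter (fun t => pvKey p r t == c)).length : Int))).sum = pvEM p r := by
    unfold pvEM pvCnt
    apply congrArg
    apply List.map_congr_left
    intro c _
    rw [List.countP_eq_length_filter]
  rw [hem]
lemma pvA_eq (p r : Int) :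
    k_energy_mixed_k3 p r = [pvEM p r, pvPC p r, pvEM p r - pvPC p r] := by
  unfold k_energy_mixed_k3
  simp only []
  rw [pvHA_eq]
  rw [pvNest r (fun (d : PySem.Dict (Int × Int) (List (Int × Int × Int))) (t : Int × Int × Int) =>
      d.modify
        (PySem.Int.mod (t.1 + t.2.1 + t.2.2) r,
         PySem.Int.mod (PySem.Int.mod ((pvH p r).getD t.1 0 * (pvH p r).getD t.2.1 0) p * (pvH p r).getD t.2.2 0) p)
        [] (fun l => l ++ [t]))]
  show [((pvTG p r).items.foldl pvBigF (0, 0)).1, ((pvTG p r).items.foldl pvBigF (0, 0)).2,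
        ((pvTG p r).items.foldl pvBigF (0, 0)).1 - ((pvTG p r).items.foldl pvBigF (0, 0)).2]
      = [pvEM p r, pvPC p r, pvEM p r - pvPC p r]
  rw [pvRes_eq]

-- ===== VERDICT (by name: the statement is the Claim_ definition above) =====
theorem k_energy_mixed_k3_spec : Claim_equal_k_energy_mixed_k3 := by
  intro p r _ _
  unfold Spec_k_energy_mixed_k3
  rw [pvA_eq, pvB_eq]
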